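-- pv_equiv track=rewrite | github.com/samjwu/ProgrammingProblemsPython | 3356/Solution.py | can_zero
-- ===== SOURCE A (Python) =====
-- from typing import List
--
-- def can_zero(nums: List[int], queries: List[List[int]], k: int) -> bool:
--     n = len(nums)
--     running = 0
--     # to keep track of queries
--     difference_array = [0] * (n + 1)
--
--     for i in range(k):
--         # update start and end of query by val
--         start, end, val = queries[i]
--
--         # increment start to signify val subtraction
--         # since the query allows subtracting val from start to end
--         difference_array[start] += val
--         # decrement end + 1 to signify end of val subtraction
--         # since the query stops
--         difference_array[end + 1] -= val
--
--     for i in range(n):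
--         running += difference_array[i]
--
--         # running below number means cannot subtract to 0
--         if running < nums[i]:
--             return False
--
--     return True
-- ===== SOURCE B (Python) =====
-- from typing import List
--
-- def can_zero(nums: List[int], queries: List[List[int]], k: int) -> bool:
--     n = len(nums)
--     for i in range(n):
--         total = 0
--         for j in range(k):
--             start, end, val = queries[j]
--             if start <= i <= end:
--                 total += val
--         if total < nums[i]:
--             return False
--     return True
-- ===== Notes on version B (the rewrite author's own statement) =====
-- stated objective: alternative
-- what changed: B replaces A's difference-array + running prefix-sum sweep by a direct nested loop that, for each index i, sums the val of every one of the first k queries whose range covers i and compares that coverage to nums[i].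
-- outside the precondition, e.g. on can_zero([0, 0, 0], [[2, 0, 5]], 1): A returns False, B returns True; on can_zero([1, 1], [[-2, 1, 1]], 1): A returns False, B returns True
import Mathlib
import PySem

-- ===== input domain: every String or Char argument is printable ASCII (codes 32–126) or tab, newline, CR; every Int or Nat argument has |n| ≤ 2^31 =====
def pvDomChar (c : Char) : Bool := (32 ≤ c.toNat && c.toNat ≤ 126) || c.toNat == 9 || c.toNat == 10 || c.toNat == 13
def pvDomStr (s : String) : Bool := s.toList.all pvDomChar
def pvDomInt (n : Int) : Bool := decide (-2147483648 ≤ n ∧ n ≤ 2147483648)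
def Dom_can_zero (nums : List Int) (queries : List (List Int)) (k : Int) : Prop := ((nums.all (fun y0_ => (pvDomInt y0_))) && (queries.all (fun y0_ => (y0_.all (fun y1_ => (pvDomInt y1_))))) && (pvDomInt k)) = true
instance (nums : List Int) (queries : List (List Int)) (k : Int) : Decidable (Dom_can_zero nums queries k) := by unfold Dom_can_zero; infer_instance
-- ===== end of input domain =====

-- B computes, per index, the coverage sum over the first k queries directly (nested loop),
-- instead of A's difference array + running prefix sweep; same boolean on all well-formed inputs.

-- ===== PORT A =====
-- one step of A's first loop: difference_array updates for query i (non-triple → Python raises; outside Pre_)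
def can_zero_qstep (queries : List (List Int)) (d : List Int) (i : Int) : List Int :=
  match PySem.List.pyGet? queries i with
  | some [start, e, v] =>
      let d1 := PySem.List.pySetD d start (PySem.List.pyGetD d start 0 + v)
      PySem.List.pySetD d1 (e + 1) (PySem.List.pyGetD d1 (e + 1) 0 - v)
  | _ => d

-- A's second loop: running prefix sum with early return False
def can_zero_sweep (nums diff : List Int) (i : Nat) (running : Int) : Bool :=
  if _h : i < nums.length then
    let r := running + PySem.List.pyGetD diff (i : Int) 0
    if r < PySem.List.pyGetD nums (i : Int) 0 then false
    else can_zero_sweep nums diff (i + 1) r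
  else true
termination_by nums.length - i

def can_zero (nums : List Int) (queries : List (List Int)) (k : Int) : Bool :=
  let n : Nat := nums.length
  let diff := (PySem.List.pyRange 0 k 1).foldl (can_zero_qstep queries) (List.replicate (n + 1) 0)
  can_zero_sweep nums diff 0 0

-- ===== PORT B =====
-- total available subtraction at index i: sum val over the first k queries with start ≤ i ≤ end
def can_zero_cover (queries : List (List Int)) (k : Int) (i : Int) : Int :=
  (PySem.List.pyRange 0 k 1).foldl (fun total j =>
    match PySem.List.pyGet? queries j with
    | some [s, e, v] => if s ≤ i ∧ i ≤ e then total + v else total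
    | _ => total) 0

def can_zero_alt_loop (nums : List Int) (queries : List (List Int)) (k : Int) (i : Nat) : Bool :=
  if _h : i < nums.length then
    if can_zero_cover queries k (i : Int) < PySem.List.pyGetD nums (i : Int) 0 then false
    else can_zero_alt_loop nums queries k (i + 1)
  else true
termination_by nums.length - i

def can_zero_alt (nums : List Int) (queries : List (List Int)) (k : Int) : Bool :=
  can_zero_alt_loop nums queries k 0

-- ===== PRECONDITION & SPEC =====
-- Pre_ is the problem's contract on the first k queries: k counts real queries and each is a
-- triple [start, end, val] with a well-formed range 0 ≤ start ≤ end < len(nums); outside it A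
-- either raises (IndexError/ValueError) or silently feeds reversed ranges / Python negative-index
-- wraparound into its difference array — malformed queries no caller of this function would pass.
def Pre_can_zero (nums : List Int) (queries : List (List Int)) (k : Int) : Prop :=
  k ≤ queries.length ∧
  ∀ q ∈ queries.take k.toNat,
    q.length = 3 ∧ 0 ≤ q.getD 0 0 ∧ q.getD 0 0 ≤ q.getD 1 0 ∧ q.getD 1 0 < nums.length
instance (nums : List Int) (queries : List (List Int)) (k : Int) : Decidable (Pre_can_zero nums queries k) := by unfold Pre_can_zero; infer_instance

def pvWitness_can_zero : List Int × List (List Int) × Int := ([1, 2], [[0, 1, 2]], 1)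

def Spec_can_zero (nums : List Int) (queries : List (List Int)) (k : Int) (out : Bool) : Prop := out = can_zero_alt nums queries k
instance (nums : List Int) (queries : List (List Int)) (k : Int) (out : Bool) : Decidable (Spec_can_zero nums queries k out) := by unfold Spec_can_zero; infer_instance

-- ===== CLAIM (what is proved, stated in full; the proofs are below) =====
def Claim_equal_can_zero : Prop := ∀ (nums : List Int) (queries : List (List Int)) (k : Int), Dom_can_zero nums queries k → Pre_can_zero nums queries k → Spec_can_zero nums queries k (can_zero nums queries k)

-- ===== LEMMAS AND PROOFS =====

-- sum of d[0..i-1] (A's running value before index i)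
def pvPsum (d : List Int) (i : Nat) : Int := ((List.range i).map (fun t => d.getD t 0)).sum

theorem pvPsum_succ (d : List Int) (i : Nat) :
    pvPsum d (i + 1) = pvPsum d i + d.getD i 0 := by
  simp [pvPsum, List.range_succ]

theorem pvPsum_set (d : List Int) (p : Nat) (w : Int) (hp : p < d.length) (m : Nat) :
    pvPsum (d.set p w) m = pvPsum d m + (if p < m then w - d.getD p 0 else 0) := by
  induction m with
  | zero => simp [pvPsum]
  | succ m ih =>
    rw [pvPsum_succ, pvPsum_succ, ih]
    by_cases hm : p = m
    · subst hm
      have hg : (d.set p w).getD p 0 = w := by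
        simp [List.getD, hp]
      rw [hg, if_neg (by omega), if_pos (by omega)]
      ring
    · have hg : (d.set p w).getD m 0 = d.getD m 0 := by
        simp [List.getD, List.getElem?_set_ne hm]
      rw [hg]
      by_cases h1 : p < m
      · rw [if_pos h1, if_pos (by omega)]; ring
      · rw [if_neg h1, if_neg (by omega)]; ring

theorem pvPsum_qstep (queries : List (List Int)) (nums : List Int)
    (d : List Int) (j : Int) (s e v : Int)
    (hget : PySem.List.pyGet? queries j = some [s, e, v])
    (hd : d.length = nums.length + 1)
    (hs : 0 ≤ s) (hse : s ≤ e) (he : e < nums.length) (i : Nat) (hi : i < nums.length) :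
    pvPsum (can_zero_qstep queries d j) (i + 1)
      = pvPsum d (i + 1) + (if s ≤ (i : Int) ∧ (i : Int) ≤ e then v else 0) := by
  have hsl : s.toNat < d.length := by omega
  have hel : (e + 1).toNat < d.length := by omega
  have hg1 : PySem.List.pyGetD d s 0 = d.getD s.toNat 0 := by
    rw [PySem.List.pyGetD_eq_getElem d 0 hs (by omega), List.getD_eq_getElem d 0 hsl]
  have hd1 : PySem.List.pySetD d s (PySem.List.pyGetD d s 0 + v)
      = d.set s.toNat (d.getD s.toNat 0 + v) := by
    rw [PySem.List.pySetD_of_nonneg d _ hs, hg1]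
  have hl1 : (d.set s.toNat (d.getD s.toNat 0 + v)).length = d.length := by simp
  have hg2 : PySem.List.pyGetD (d.set s.toNat (d.getD s.toNat 0 + v)) (e + 1) 0
      = (d.set s.toNat (d.getD s.toNat 0 + v)).getD (e + 1).toNat 0 := by
    rw [PySem.List.pyGetD_eq_getElem _ 0 (by omega) (by rw [hl1]; omega)]
    exact (List.getD_eq_getElem _ 0 (by rw [hl1]; omega)).symm
  have hq : can_zero_qstep queries d j
      = (d.set s.toNat (d.getD s.toNat 0 + v)).set (e + 1).toNat
          ((d.set s.toNat (d.getD s.toNat 0 + v)).getD (e + 1).toNat 0 - v) := by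
    unfold can_zero_qstep
    rw [hget]
    show PySem.List.pySetD (PySem.List.pySetD d s (PySem.List.pyGetD d s 0 + v)) (e + 1)
        (PySem.List.pyGetD (PySem.List.pySetD d s (PySem.List.pyGetD d s 0 + v)) (e + 1) 0 - v) = _
    rw [hd1, hg2, PySem.List.pySetD_of_nonneg _ _ (by omega : (0:Int) ≤ e + 1)]
  rw [hq, pvPsum_set _ _ _ (by omega), pvPsum_set _ _ _ hsl]
  by_cases c1 : s ≤ (i : Int) <;> by_cases c2 : (i : Int) ≤ e
  · rw [if_pos (by omega : s.toNat < i + 1), if_neg (by omega : ¬ (e + 1).toNat < i + 1),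
      if_pos ⟨c1, c2⟩]
    ring
  · rw [if_pos (by omega : s.toNat < i + 1), if_pos (by omega : (e + 1).toNat < i + 1),
      if_neg (by tauto)]
    ring
  · rw [if_neg (by omega : ¬ s.toNat < i + 1), if_neg (by omega : ¬ (e + 1).toNat < i + 1),
      if_neg (by tauto)]
    ring
  · omega

-- validity of each of the first k queries, as Pre_ gives it
def pvValid (nums : List Int) (queries : List (List Int)) (j : Int) : Prop :=
  ∃ s e v, PySem.List.pyGet? queries j = some [s, e, v] ∧ 0 ≤ s ∧ s ≤ e ∧ e < nums.length

theorem pvMain (nums : List Int) (queries : List (List Int))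
    (js : List Int) (hjs : ∀ j ∈ js, pvValid nums queries j)
    (d : List Int) (hd : d.length = nums.length + 1)
    (t : Int) (i : Nat) (hi : i < nums.length) :
    pvPsum (js.foldl (can_zero_qstep queries) d) (i + 1) + t
      = pvPsum d (i + 1) +
        js.foldl (fun total j =>
          match PySem.List.pyGet? queries j with
          | some [s, e, v] => if s ≤ (i : Int) ∧ (i : Int) ≤ e then total + v else total
          | _ => total) t := by
  induction js generalizing d t with
  | nil => simp
  | cons j js ih =>
    obtain ⟨s, e, v, hget, hs, hse, he⟩ := hjs j (by simp)
    have hd' : (can_zero_qstep queries d j).length = nums.length + 1 := by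
      unfold can_zero_qstep
      rw [hget]
      show (PySem.List.pySetD (PySem.List.pySetD d s (PySem.List.pyGetD d s 0 + v)) (e + 1)
        (PySem.List.pyGetD (PySem.List.pySetD d s (PySem.List.pyGetD d s 0 + v)) (e + 1) 0 - v)).length = _
      rw [PySem.List.length_pySetD, PySem.List.length_pySetD, hd]
    have := ih (fun j hj => hjs j (by simp [hj])) (can_zero_qstep queries d j) hd'
      (match PySem.List.pyGet? queries j with
       | some [s, e, v] => if s ≤ (i : Int) ∧ (i : Int) ≤ e then t + v else t
       | _ => t)
    simp only [List.foldl_cons]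
    rw [hget] at this ⊢
    rw [pvPsum_qstep queries nums d j s e v hget hd hs hse he i hi] at this
    by_cases c : s ≤ (i : Int) ∧ (i : Int) ≤ e
    · simp only [if_pos c] at this ⊢; omega
    · simp only [if_neg c] at this ⊢; omega

theorem pvPsum_replicate (m i : Nat) : pvPsum (List.replicate m (0 : Int)) i = 0 := by
  induction i with
  | zero => simp [pvPsum]
  | succ i ih => rw [pvPsum_succ, ih]; simp [List.getD]

theorem pvCover_eq (nums : List Int) (queries : List (List Int)) (k : Int)
    (hpre : Pre_can_zero nums queries k) (i : Nat) (hi : i < nums.length) :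
    pvPsum ((PySem.List.pyRange 0 k 1).foldl (can_zero_qstep queries)
        (List.replicate (nums.length + 1) 0)) (i + 1)
      = can_zero_cover queries k (i : Int) := by
  obtain ⟨hkl, hq⟩ := hpre
  have hjs : ∀ j ∈ PySem.List.pyRange 0 k 1, pvValid nums queries j := by
    intro j hj
    rw [PySem.List.mem_pyRange_one] at hj
    obtain ⟨hj0, hjk⟩ := hj
    have hjn : j.toNat < queries.length := by omega
    have hget : PySem.List.pyGet? queries j = some queries[j.toNat] := by
      rw [PySem.List.pyGet?_of_nonneg queries hj0, List.getElem?_eq_getElem hjn]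
    have hjt : j.toNat < (queries.take k.toNat).length := by
      simp only [List.length_take]
      omega
    have hmem : queries[j.toNat] ∈ queries.take k.toNat := by
      have hEq : (queries.take k.toNat)[j.toNat] = queries[j.toNat] := List.getElem_take
      exact hEq ▸ List.getElem_mem hjt
    obtain ⟨h3, h0, hse, he⟩ := hq _ hmem
    obtain ⟨s, e, v, hqe⟩ := List.length_eq_three.mp h3
    rw [hqe] at h0 hse he hget
    simp only [List.getD] at h0 hse he
    exact ⟨s, e, v, hget, by simpa using h0, by simpa using hse, by simpa using he⟩
  have := pvMain nums queries (PySem.List.pyRange 0 k 1) hjs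
    (List.replicate (nums.length + 1) 0) (by simp) 0 i hi
  rw [pvPsum_replicate] at this
  unfold can_zero_cover
  omega

theorem pvLoops_eq (nums : List Int) (queries : List (List Int)) (k : Int)
    (hpre : Pre_can_zero nums queries k) (diff : List Int)
    (hdiff : diff = (PySem.List.pyRange 0 k 1).foldl (can_zero_qstep queries)
        (List.replicate (nums.length + 1) 0))
    (i : Nat) (r : Int) (hr : r = pvPsum diff i) :
    can_zero_sweep nums diff i r = can_zero_alt_loop nums queries k i := by
  unfold can_zero_sweep can_zero_alt_loop
  by_cases h : i < nums.length
  · rw [dif_pos h, dif_pos h]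
    have hstep : r + PySem.List.pyGetD diff (i : Int) 0 = can_zero_cover queries k (i : Int) := by
      rw [PySem.List.pyGetD_natCast, hr, ← pvPsum_succ, hdiff]
      exact pvCover_eq nums queries k hpre i h
    show (if r + PySem.List.pyGetD diff (i : Int) 0 < PySem.List.pyGetD nums (i : Int) 0 then false
          else can_zero_sweep nums diff (i + 1) (r + PySem.List.pyGetD diff (i : Int) 0)) = _
    rw [hstep]
    by_cases hc : can_zero_cover queries k (i : Int) < PySem.List.pyGetD nums (i : Int) 0
    · rw [if_pos hc, if_pos hc]
    · rw [if_neg hc, if_neg hc]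
      exact pvLoops_eq nums queries k hpre diff hdiff (i + 1) _
        (by rw [← hstep, hr, PySem.List.pyGetD_natCast, pvPsum_succ])
  · rw [dif_neg h, dif_neg h]
termination_by nums.length - i

-- ===== VERDICT (by name: the statement is the Claim_ definition above) =====
theorem can_zero_spec : Claim_equal_can_zero := by
  intro nums queries k _hdom hpre
  unfold Spec_can_zero can_zero can_zero_alt
  exact pvLoops_eq nums queries k hpre _ rfl 0 0 (by simp [pvPsum])
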